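-- pv_equiv track=rewrite | github.com/fabischw/ppp-2023 | Exercises/Corvin Ansorge/exercises_03.py | check_number
-- ===== SOURCE A (Python) =====
-- def check_number(number):
--     number = str(number)
--     if number != "".join(sorted(number)):
--         return False
--     for i in range(10):
--         if str(i)*2 in number and str(i)*3 not in number:
--             return True
--     return False
-- ===== SOURCE B (Python) =====
-- def check_number(number):
--     s = str(number)
--     if s != "".join(sorted(s)):
--         return False
--     counts = {}
--     for ch in s:
--         counts[ch] = counts.get(ch, 0) + 1
--     return any('0' <= ch <= '9' and v == 2 for ch, v in counts.items())
-- ===== Notes on version B (the rewrite author's own statement) =====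
-- stated objective: simpler
-- what changed: Keeps the sorted-string guard but replaces A's loop over the ten digits with substring tests for 'dd'/'ddd' by a single frequency dictionary built in one pass over the string, returning whether some digit occurs exactly twice (on a sorted string, double-but-no-triple = count exactly 2).
import Mathlib
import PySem

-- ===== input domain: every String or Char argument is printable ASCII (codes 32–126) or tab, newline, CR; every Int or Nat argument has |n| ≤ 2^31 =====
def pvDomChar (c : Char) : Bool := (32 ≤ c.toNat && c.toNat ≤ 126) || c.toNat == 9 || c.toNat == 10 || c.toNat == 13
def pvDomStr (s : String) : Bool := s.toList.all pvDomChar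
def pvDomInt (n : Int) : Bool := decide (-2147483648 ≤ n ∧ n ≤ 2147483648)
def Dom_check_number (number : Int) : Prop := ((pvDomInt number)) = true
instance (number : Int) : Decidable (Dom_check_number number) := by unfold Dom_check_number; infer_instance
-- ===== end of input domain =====

-- B replaces A's ten substring scans by one frequency dict and a pass over its items (objective: simpler/alternative).

-- ===== PORT A =====
-- str-level ops ported on List Char via PySem.Chars (exact; Lean's String ops are kernel-opaque)
def check_number (number : Int) : Bool :=
  let cs := (PySem.Int.toStr number).toList
  if cs ≠ PySem.List.sorted cs (fun c => c) false then false
  else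
    (PySem.List.pyRange 0 10 1).any (fun i =>
      let d := (PySem.Int.toStr i).toList
      PySem.Chars.isIn (d ++ d) cs && !(PySem.Chars.isIn (d ++ d ++ d) cs))

-- ===== PORT B =====
def check_number_alt (number : Int) : Bool :=
  let cs := (PySem.Int.toStr number).toList
  if cs ≠ PySem.List.sorted cs (fun c => c) false then false
  else
    let counts := cs.foldl (fun d ch => d.insert ch (d.getD ch (0 : Int) + 1)) PySem.Dict.empty
    counts.items.any (fun p => ('0' ≤ p.1 && p.1 ≤ '9') && p.2 == 2)

-- ===== PRECONDITION & SPEC =====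
def Spec_check_number (number : Int) (out : Bool) : Prop := out = check_number_alt number
instance (number : Int) (out : Bool) : Decidable (Spec_check_number number out) := by unfold Spec_check_number; infer_instance

-- ===== CLAIM (what is proved, stated in full; the proofs are below) =====
def Claim_equal_check_number : Prop := ∀ (number : Int), Dom_check_number number → Spec_check_number number (check_number number)

-- ===== LEMMAS AND PROOFS =====

-- In a sorted list, all copies of c sitting at the head are contiguous: the first count-many elements are c.
theorem pv_replicate_count_prefix (c : Char) (t : List Char)
    (hall : ∀ y ∈ t, c ≤ y) (hp : t.Pairwise (· ≤ ·)) :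
    List.replicate (t.count c) c <+: t := by
  induction t with
  | nil => simp
  | cons y t' ih =>
    rcases List.pairwise_cons.mp hp with ⟨hy, hp'⟩
    by_cases hyc : y = c
    · subst hyc
      rw [List.count_cons_self, List.replicate_succ]
      exact List.cons_prefix_cons.mpr ⟨rfl, ih (fun z hz => hy z hz) hp'⟩
    · have hcy : c < y := lt_of_le_of_ne (hall y (List.mem_cons_self)) (fun h => hyc h.symm)
      have hnot : c ∉ y :: t' := by
        intro hmem
        rcases List.mem_cons.mp hmem with h | h
        · exact hyc h.symm
        · exact absurd (hy c h) (not_le.mpr hcy)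
      rw [List.count_eq_zero.mpr hnot]
      simp

theorem pv_replicate_count_infix (c : Char) (cs : List Char) (hp : cs.Pairwise (· ≤ ·)) :
    List.replicate (cs.count c) c <:+: cs := by
  induction cs with
  | nil => simp
  | cons x t ih =>
    rcases List.pairwise_cons.mp hp with ⟨hx, hp'⟩
    by_cases hxc : x = c
    · subst hxc
      rw [List.count_cons_self, List.replicate_succ]
      exact (List.cons_prefix_cons.mpr ⟨rfl, pv_replicate_count_prefix x t hx hp'⟩).isInfix
    · rw [List.count_cons_of_ne hxc]
      exact List.infix_cons (ih hp')

theorem pv_isIn_replicate (c : Char) (n : Nat) (cs : List Char) (hp : cs.Pairwise (· ≤ ·)) :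
    PySem.Chars.isIn (List.replicate n c) cs = decide (n ≤ cs.count c) := by
  by_cases h : n ≤ cs.count c
  · have hpre : List.replicate n c <+: List.replicate (cs.count c) c := by
      have : List.replicate (cs.count c) c = List.replicate n c ++ List.replicate (cs.count c - n) c := by
        rw [← List.replicate_add]
        congr 1
        omega
      rw [this]
      exact List.prefix_append _ _
    have : PySem.Chars.isIn (List.replicate n c) cs = true :=
      (PySem.Chars.isIn_iff_infix _ _).mpr (hpre.isInfix.trans (pv_replicate_count_infix c cs hp))
    simp [this, h]
  · have : PySem.Chars.isIn (List.replicate n c) cs = false := by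
      rw [PySem.Chars.isIn_eq_false_iff]
      intro hinf
      have := hinf.sublist.count_le c
      simp at this
      omega
    simp [this, h]

-- "cc in cs and ccc not in cs" on a sorted cs says exactly: c occurs twice.
theorem pv_double_triple (c : Char) (cs : List Char) (hp : cs.Pairwise (· ≤ ·)) :
    (PySem.Chars.isIn [c, c] cs && !(PySem.Chars.isIn [c, c, c] cs)) = decide (cs.count c = 2) := by
  rw [show [c, c, c] = List.replicate 3 c from rfl, show [c, c] = List.replicate 2 c from rfl,
      pv_isIn_replicate c 2 cs hp, pv_isIn_replicate c 3 cs hp]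
  by_cases h2 : 2 ≤ cs.count c <;> by_cases h3 : 3 ≤ cs.count c <;>
    simp [h2, h3] <;> omega

theorem pv_digit_cases (k : Char) (h0 : '0' ≤ k) (h9 : k ≤ '9') :
    k = '0' ∨ k = '1' ∨ k = '2' ∨ k = '3' ∨ k = '4' ∨ k = '5' ∨ k = '6' ∨ k = '7' ∨ k = '8' ∨ k = '9' := by
  have hl : 48 ≤ k.toNat := by
    have := (UInt32.le_iff_toNat_le).mp (Char.le_def.mp h0)
    simpa using this
  have hr : k.toNat ≤ 57 := by
    have := (UInt32.le_iff_toNat_le).mp (Char.le_def.mp h9)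
    simpa using this
  interval_cases h : k.toNat <;>
    [exact Or.inl (Char.ext (UInt32.toNat_inj.mp h));
     exact Or.inr (Or.inl (Char.ext (UInt32.toNat_inj.mp h)));
     exact Or.inr (Or.inr (Or.inl (Char.ext (UInt32.toNat_inj.mp h))));
     exact Or.inr (Or.inr (Or.inr (Or.inl (Char.ext (UInt32.toNat_inj.mp h)))));
     exact Or.inr (Or.inr (Or.inr (Or.inr (Or.inl (Char.ext (UInt32.toNat_inj.mp h))))));
     exact Or.inr (Or.inr (Or.inr (Or.inr (Or.inr (Or.inl (Char.ext (UInt32.toNat_inj.mp h)))))));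
     exact Or.inr (Or.inr (Or.inr (Or.inr (Or.inr (Or.inr (Or.inl (Char.ext (UInt32.toNat_inj.mp h))))))));
     exact Or.inr (Or.inr (Or.inr (Or.inr (Or.inr (Or.inr (Or.inr (Or.inl (Char.ext (UInt32.toNat_inj.mp h)))))))));
     exact Or.inr (Or.inr (Or.inr (Or.inr (Or.inr (Or.inr (Or.inr (Or.inr (Or.inl (Char.ext (UInt32.toNat_inj.mp h))))))))));
     exact Or.inr (Or.inr (Or.inr (Or.inr (Or.inr (Or.inr (Or.inr (Or.inr (Or.inr (Char.ext (UInt32.toNat_inj.mp h))))))))))]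

-- ===== VERDICT (by name: the statement is the Claim_ definition above) =====
set_option maxHeartbeats 1000000 in
theorem check_number_spec : Claim_equal_check_number := by
  intro number _
  unfold Spec_check_number check_number check_number_alt
  set cs := (PySem.Int.toStr number).toList with hcs
  by_cases hg : cs ≠ PySem.List.sorted cs (fun c => c) false
  · simp [hg]
  · simp only [hg, if_false]
    rw [not_not] at hg
    have hp : cs.Pairwise (· ≤ ·) := by
      have := PySem.List.sorted_pairwise (xs := cs) (key := fun c => c)
      rw [← hg] at this
      exact this
    rw [PySem.Dict.foldl_insert_getD_add_one_eq_counter]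
    rw [show PySem.List.pyRange 0 10 1 = [0,1,2,3,4,5,6,7,8,9] from by decide]
    simp only [List.any_cons, List.any_nil]
    rw [show (PySem.Int.toStr 0).toList = ['0'] from rfl, show (PySem.Int.toStr 1).toList = ['1'] from rfl,
        show (PySem.Int.toStr 2).toList = ['2'] from rfl, show (PySem.Int.toStr 3).toList = ['3'] from rfl,
        show (PySem.Int.toStr 4).toList = ['4'] from rfl, show (PySem.Int.toStr 5).toList = ['5'] from rfl,
        show (PySem.Int.toStr 6).toList = ['6'] from rfl, show (PySem.Int.toStr 7).toList = ['7'] from rfl,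
        show (PySem.Int.toStr 8).toList = ['8'] from rfl, show (PySem.Int.toStr 9).toList = ['9'] from rfl]
    simp only [List.cons_append, List.nil_append]
    rw [pv_double_triple '0' cs hp, pv_double_triple '1' cs hp, pv_double_triple '2' cs hp,
        pv_double_triple '3' cs hp, pv_double_triple '4' cs hp, pv_double_triple '5' cs hp,
        pv_double_triple '6' cs hp, pv_double_triple '7' cs hp, pv_double_triple '8' cs hp,
        pv_double_triple '9' cs hp]
    rw [PySem.Dict.items_counter, List.any_map]
    rw [Bool.eq_iff_iff]
    simp only [Bool.or_eq_true, decide_eq_true_eq, List.any_eq_true, Function.comp,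
      Bool.and_eq_true, beq_iff_eq, PySem.Set.mem_ofList, Bool.false_eq_true, or_false]
    constructor
    · intro h
      have mk : ∀ c : Char, ('0' ≤ c ∧ c ≤ '9') → cs.count c = 2 →
          ∃ k, k ∈ cs ∧ (('0' ≤ k ∧ k ≤ '9') ∧ (cs.count k : Int) = 2) := by
        intro c hd h2
        exact ⟨c, List.count_pos_iff.mp (by omega), hd, by exact_mod_cast h2⟩
      rcases h with h | h | h | h | h | h | h | h | h | h
      · exact mk '0' (by decide) h
      · exact mk '1' (by decide) h
      · exact mk '2' (by decide) h
      · exact mk '3' (by decide) h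
      · exact mk '4' (by decide) h
      · exact mk '5' (by decide) h
      · exact mk '6' (by decide) h
      · exact mk '7' (by decide) h
      · exact mk '8' (by decide) h
      · exact mk '9' (by decide) h
    · rintro ⟨k, _, ⟨hd0, hd9⟩, h2⟩
      have h2' : cs.count k = 2 := by exact_mod_cast h2
      rcases pv_digit_cases k hd0 hd9 with h | h | h | h | h | h | h | h | h | h <;>
        subst h <;> simp [h2']
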